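-- pv_equiv track=rewrite | github.com/kih1024/codingStudy | 2.py | solution
-- ===== SOURCE A (Python) =====
-- def longest(arr):
--     temp = "".join(arr)
--     li = list(temp.split("0"))
--     maxV = 0
--     total = 0
--     count = []
--     for i in li:
--         total += len(i)
--         maxV = max(maxV, len(i))
--
--     return total + (maxV ** 2)
--
-- def solution(answer_sheet, sheets):
--     dp = [1] * len(answer_sheet)
--     result = []
--     # i는 각각의 답변들
--     for i in range(len(sheets) - 1):
--         for j in range(i + 1, len(sheets)):
--             arr = []
--             for k in range(len(answer_sheet)):
--                 if sheets[i][k] == sheets[j][k] and sheets[i][k] != answer_sheet[k]: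
--                     arr.append(sheets[i][k])
--                 else:
--                     arr.append("0")
--             result.append(longest(arr))
--
--     # answer = -1
--     return max(result)
-- ===== SOURCE B (Python) =====
-- def solution(answer_sheet, sheets):
--     best_overall = None
--     for i in range(len(sheets) - 1):
--         for j in range(i + 1, len(sheets)):
--             cnt = run = best = 0
--             for k in range(len(answer_sheet)):
--                 piece = sheets[i][k] if sheets[i][k] == sheets[j][k] and sheets[i][k] != answer_sheet[k] else "0"
--                 for ch in piece:
--                     if ch == '0':
--                         run = 0
--                     else:
--                         cnt += 1
--                         run += 1
--                         if run > best:
--                             best = run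
--             score = cnt + best * best
--             if best_overall is None or score > best_overall:
--                 best_overall = score
--     return best_overall
-- ===== Notes on version B (the rewrite author's own statement) =====
-- stated objective: simpler
-- what changed: Per pair, B replaces the join/split('0')/list-of-pieces helper with one arithmetic pass over characters maintaining a count of non-'0' characters and the longest current run, and tracks the running maximum score instead of building a result list and calling max().
import Mathlib
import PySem

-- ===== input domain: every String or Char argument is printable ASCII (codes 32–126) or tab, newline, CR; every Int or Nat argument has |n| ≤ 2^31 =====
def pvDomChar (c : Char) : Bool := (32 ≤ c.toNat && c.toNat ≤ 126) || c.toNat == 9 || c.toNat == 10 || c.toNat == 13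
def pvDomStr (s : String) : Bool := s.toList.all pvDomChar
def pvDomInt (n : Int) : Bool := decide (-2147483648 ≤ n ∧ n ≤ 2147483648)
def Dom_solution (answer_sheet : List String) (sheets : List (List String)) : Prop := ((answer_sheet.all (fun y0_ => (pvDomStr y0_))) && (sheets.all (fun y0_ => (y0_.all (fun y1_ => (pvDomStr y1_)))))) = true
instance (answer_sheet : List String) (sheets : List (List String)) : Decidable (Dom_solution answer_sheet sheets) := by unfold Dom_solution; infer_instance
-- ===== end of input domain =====

-- B replaces the join/split('0') helper by one arithmetic pass per pair (count + longest run) and a running maximum; objective: simpler.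

-- ===== PORT A =====
-- A's helper 'longest', transliterated (the unused 'count = []' is dead code and dropped)
def pvLongest (arr : List String) : Int :=
  let temp := PySem.Str.join "" arr
  let li := (PySem.Str.split? temp "0").getD []
  let st := li.foldl (fun (p : Int × Int) s => (max p.1 (PySem.Str.len s), p.2 + PySem.Str.len s)) (0, 0)
  st.2 + st.1 ^ 2

def solution (answer_sheet : List String) (sheets : List (List String)) : Int :=
  let result := (PySem.List.pyRange 0 ((sheets.length : Int) - 1) 1).foldl (fun result i =>
    (PySem.List.pyRange (i + 1) (sheets.length : Int) 1).foldl (fun result j =>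
      let arr := (PySem.List.pyRange 0 ((answer_sheet.length : Int)) 1).foldl (fun arr k =>
        let sik := (PySem.List.pyGet? ((PySem.List.pyGet? sheets i).getD []) k).getD ""
        let sjk := (PySem.List.pyGet? ((PySem.List.pyGet? sheets j).getD []) k).getD ""
        let ak := (PySem.List.pyGet? answer_sheet k).getD ""
        if sik = sjk ∧ sik ≠ ak then arr ++ [sik] else arr ++ ["0"]) []
      result ++ [pvLongest arr]) result) []
  (PySem.List.max? result (fun x => x)).getD 0

-- ===== PORT B =====
def solution_alt (answer_sheet : List String) (sheets : List (List String)) : Int :=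
  let best :=
    (PySem.List.pyRange 0 ((sheets.length : Int) - 1) 1).foldl (fun bo i =>
      (PySem.List.pyRange (i + 1) (sheets.length : Int) 1).foldl (fun bo j =>
        let st := (PySem.List.pyRange 0 ((answer_sheet.length : Int)) 1).foldl
          (fun (st : Int × Int × Int) k =>
            let sik := (PySem.List.pyGet? ((PySem.List.pyGet? sheets i).getD []) k).getD ""
            let sjk := (PySem.List.pyGet? ((PySem.List.pyGet? sheets j).getD []) k).getD ""
            let ak := (PySem.List.pyGet? answer_sheet k).getD ""
            let piece := if sik = sjk ∧ sik ≠ ak then sik else "0"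
            piece.toList.foldl (fun (st : Int × Int × Int) ch =>
              if ch = '0' then (st.1, 0, st.2.2)
              else (st.1 + 1, st.2.1 + 1, if st.2.1 + 1 > st.2.2 then st.2.1 + 1 else st.2.2)) st)
          ((0, 0, 0) : Int × Int × Int)
        let score := st.1 + st.2.2 * st.2.2
        match bo with
        | none => some score
        | some m => if score > m then some score else some m) bo)
      (none : Option Int)
  best.getD 0

-- ===== PRECONDITION & SPEC =====
-- Pre_ excludes exactly the inputs on which the Python A raises: fewer than two sheets
-- (max([]) raises ValueError) or a sheet row shorter than answer_sheet (IndexError).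
def Pre_solution (answer_sheet : List String) (sheets : List (List String)) : Prop :=
  2 ≤ sheets.length ∧ ∀ row ∈ sheets, answer_sheet.length ≤ row.length
instance (answer_sheet : List String) (sheets : List (List String)) : Decidable (Pre_solution answer_sheet sheets) := by unfold Pre_solution; infer_instance

def pvWitness_solution : List String × List (List String) := (["a"], [["a"], ["b"]])

def Spec_solution (answer_sheet : List String) (sheets : List (List String)) (out : Int) : Prop := out = solution_alt answer_sheet sheets
instance (answer_sheet : List String) (sheets : List (List String)) (out : Int) : Decidable (Spec_solution answer_sheet sheets out) := by unfold Spec_solution; infer_instance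

-- ===== CLAIM (what is proved, stated in full; the proofs are below) =====
def Claim_equal_solution : Prop := ∀ (answer_sheet : List String) (sheets : List (List String)), Dom_solution answer_sheet sheets → Pre_solution answer_sheet sheets → Spec_solution answer_sheet sheets (solution answer_sheet sheets)

-- ===== LEMMAS AND PROOFS =====

-- reference head-recursive form of Python's split("0")
def pvSp : List Char → List (List Char)
  | [] => [[]]
  | c :: cs =>
    if c = '0' then [] :: pvSp cs
    else
      match pvSp cs with
      | [] => [[c]]
      | h :: t => (c :: h) :: t

theorem pvSp_ne_nil (cs : List Char) : pvSp cs ≠ [] := by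
  cases cs with
  | nil => simp [pvSp]
  | cons c cs =>
    simp only [pvSp]
    split
    · simp
    · split <;> simp

theorem pv_go_eq (cs : List Char) : ∀ (fuel : Nat) (cur : List Char) (acc : List (List Char)),
    cs.length ≤ fuel →
    PySem.Chars.splitOn.go ['0'] fuel cs cur acc
      = acc.reverse ++ (pvSp cs).modifyHead (fun h => cur.reverse ++ h) := by
  induction cs with
  | nil =>
    intro fuel cur acc _
    cases fuel with
    | zero => simp [PySem.Chars.splitOn.go, pvSp]
    | succ f => simp [PySem.Chars.splitOn.go, pvSp]
  | cons c rest ih =>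
    intro fuel cur acc h
    cases fuel with
    | zero => simp at h
    | succ f =>
      by_cases hc : c = '0'
      · subst hc
        rw [show PySem.Chars.splitOn.go ['0'] (f + 1) ('0' :: rest) cur acc
              = PySem.Chars.splitOn.go ['0'] f rest [] (cur.reverse :: acc) by
            simp [PySem.Chars.splitOn.go, List.isPrefixOf]]
        rw [ih f [] (cur.reverse :: acc) (by simpa using h)]
        cases hsp : pvSp rest with
        | nil => exact absurd hsp (pvSp_ne_nil rest)
        | cons h0 t0 => simp [pvSp, hsp]
      · rw [show PySem.Chars.splitOn.go ['0'] (f + 1) (c :: rest) cur acc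
              = PySem.Chars.splitOn.go ['0'] f rest (c :: cur) acc by
            simp [PySem.Chars.splitOn.go, List.isPrefixOf, Ne.symm hc]]
        rw [ih f (c :: cur) acc (by simpa using Nat.le_of_succ_le_succ h)]
        cases hsp : pvSp rest with
        | nil => exact absurd hsp (pvSp_ne_nil rest)
        | cons h0 t0 => simp [pvSp, hc, hsp]

theorem pv_splitOn_eq (cs : List Char) : PySem.Chars.splitOn cs ['0'] = pvSp cs := by
  rw [PySem.Chars.splitOn, pv_go_eq cs (cs.length + 1) [] [] (by omega)]
  cases hsp : pvSp cs with
  | nil => exact absurd hsp (pvSp_ne_nil cs)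
  | cons h t => simp

-- join with empty separator is concatenation
theorem pv_join_nil (l : List (List Char)) : PySem.Chars.join [] l = l.flatten := by
  induction l with
  | nil => simp [PySem.Chars.join_nil]
  | cons h t ih =>
    cases t with
    | nil => simp [PySem.Chars.join_singleton]
    | cons h2 t2 => rw [PySem.Chars.join_cons_cons]; simp [ih]

-- last-piece extension (the non-'0' concat case of pvSp)
def pvExt : List (List Char) → Char → List (List Char)
  | [], c => [[c]]
  | [h], c => [h ++ [c]]
  | h :: h2 :: t, c => h :: pvExt (h2 :: t) c

theorem pvSp_concat_zero (cs : List Char) : pvSp (cs ++ ['0']) = pvSp cs ++ [[]] := by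
  induction cs with
  | nil => simp [pvSp]
  | cons c rest ih =>
    by_cases hc : c = '0'
    · simp [pvSp, hc, ih]
    · cases hsp : pvSp rest with
      | nil => exact absurd hsp (pvSp_ne_nil rest)
      | cons h t => simp [pvSp, hc, ih, hsp]

theorem pvSp_concat_ne (cs : List Char) (c : Char) (hc : c ≠ '0') :
    pvSp (cs ++ [c]) = pvExt (pvSp cs) c := by
  induction cs with
  | nil => simp [pvSp, hc, pvExt]
  | cons d rest ih =>
    by_cases hd : d = '0'
    · cases hsp : pvSp rest with
      | nil => exact absurd hsp (pvSp_ne_nil rest)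
      | cons h t => simp [pvSp, hd, ih, hsp, pvExt]
    · cases hsp : pvSp rest with
      | nil => exact absurd hsp (pvSp_ne_nil rest)
      | cons h t =>
        cases t with
        | nil => simp [pvSp, hd, ih, hsp, pvExt]
        | cons h2 t2 => simp [pvSp, hd, ih, hsp, pvExt]

-- the three Nat quantities of a split
def pvSum (l : List (List Char)) : Nat := (l.map List.length).sum
def pvLastLen (l : List (List Char)) : Nat := ((l.getLast?).getD []).length
def pvMaxLen (l : List (List Char)) : Nat := (l.map List.length).foldl max 0

theorem pvSum_ext (l : List (List Char)) (c : Char) : pvSum (pvExt l c) = pvSum l + 1 := by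
  induction l with
  | nil => simp [pvExt, pvSum]
  | cons h t ih =>
    cases t with
    | nil => simp [pvExt, pvSum]
    | cons h2 t2 => simp [pvExt, pvSum] at ih ⊢; omega

theorem pvLastLen_ext (l : List (List Char)) (c : Char) : pvLastLen (pvExt l c) = pvLastLen l + 1 := by
  induction l with
  | nil => simp [pvExt, pvLastLen]
  | cons h t ih =>
    cases t with
    | nil => simp [pvExt, pvLastLen]
    | cons h2 t2 =>
      simp only [pvExt]
      rw [pvLastLen, pvLastLen] at ih ⊢
      rcases List.exists_cons_of_ne_nil (l := pvExt (h2 :: t2) c) (by cases t2 <;> simp [pvExt]) with ⟨e, es, hee⟩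
      simp [hee] at ih ⊢
      simpa [hee] using ih

theorem pv_foldl_max_ext (l : List (List Char)) (c : Char) : ∀ (a : Nat),
    ((pvExt l c).map List.length).foldl max a = max ((l.map List.length).foldl max a) (pvLastLen l + 1) := by
  induction l with
  | nil => intro a; simp [pvExt, pvLastLen]
  | cons h t ih =>
    intro a
    cases t with
    | nil => simp [pvExt, pvLastLen]
    | cons h2 t2 => simp only [pvExt, List.map_cons, List.foldl_cons]; rw [ih]; simp [pvLastLen]

theorem pvMaxLen_ext (l : List (List Char)) (c : Char) :
    pvMaxLen (pvExt l c) = max (pvMaxLen l) (pvLastLen l + 1) := by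
  simpa [pvMaxLen] using pv_foldl_max_ext l c 0

theorem pvMaxLen_app_nil (l : List (List Char)) : pvMaxLen (l ++ [[]]) = pvMaxLen l := by
  simp [pvMaxLen, List.foldl_append]

-- Nat version of B's per-character step
def pvStepN (s : Nat × Nat × Nat) (c : Char) : Nat × Nat × Nat :=
  if c = '0' then (s.1, 0, s.2.2) else (s.1 + 1, s.2.1 + 1, max s.2.2 (s.2.1 + 1))

theorem pv_fold_stepN (cs : List Char) :
    cs.foldl pvStepN (0, 0, 0) = (pvSum (pvSp cs), pvLastLen (pvSp cs), pvMaxLen (pvSp cs)) := by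
  induction cs using List.reverseRecOn with
  | nil => simp [pvSp, pvSum, pvLastLen, pvMaxLen]
  | append_singleton l c ih =>
    rw [List.foldl_append, List.foldl_cons, List.foldl_nil, ih]
    by_cases hc : c = '0'
    · subst hc
      rw [pvSp_concat_zero]
      simp [pvStepN, pvSum, pvLastLen, pvMaxLen_app_nil]
    · rw [pvSp_concat_ne l c hc, pvSum_ext, pvLastLen_ext, pvMaxLen_ext]
      simp [pvStepN, hc]

-- B's Int step equals the Nat step under casting
theorem pv_fold_stepI (cs : List Char) : ∀ (s : Nat × Nat × Nat),
    cs.foldl (fun (st : Int × Int × Int) ch =>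
        if ch = '0' then (st.1, 0, st.2.2)
        else (st.1 + 1, st.2.1 + 1, if st.2.1 + 1 > st.2.2 then st.2.1 + 1 else st.2.2))
      ((s.1 : Int), (s.2.1 : Int), (s.2.2 : Int))
    = (((cs.foldl pvStepN s).1 : Int), ((cs.foldl pvStepN s).2.1 : Int), ((cs.foldl pvStepN s).2.2 : Int)) := by
  induction cs with
  | nil => intro s; simp
  | cons c rest ih =>
    intro s
    have hstep : (fun (st : Int × Int × Int) ch =>
        if ch = '0' then (st.1, 0, st.2.2)
        else (st.1 + 1, st.2.1 + 1, if st.2.1 + 1 > st.2.2 then st.2.1 + 1 else st.2.2))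
          ((s.1 : Int), (s.2.1 : Int), (s.2.2 : Int)) c
        = (((pvStepN s c).1 : Int), ((pvStepN s c).2.1 : Int), ((pvStepN s c).2.2 : Int)) := by
      by_cases hc : c = '0'
      · simp [pvStepN, hc]
      · simp only [pvStepN, if_neg hc, Prod.mk.injEq]
        refine ⟨by push_cast; ring, by push_cast; ring, ?_⟩
        split_ifs with h <;> push_cast <;> omega
    show List.foldl (fun (st : Int × Int × Int) ch =>
        if ch = '0' then (st.1, 0, st.2.2)
        else (st.1 + 1, st.2.1 + 1, if st.2.1 + 1 > st.2.2 then st.2.1 + 1 else st.2.2))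
      ((fun (st : Int × Int × Int) ch =>
        if ch = '0' then (st.1, 0, st.2.2)
        else (st.1 + 1, st.2.1 + 1, if st.2.1 + 1 > st.2.2 then st.2.1 + 1 else st.2.2))
          ((s.1 : Int), (s.2.1 : Int), (s.2.2 : Int)) c) rest = _
    rw [hstep]
    exact ih (pvStepN s c)

-- A's loop over the split pieces computes (max, sum)
theorem pv_fold_pieces (l : List (List Char)) : ∀ (a t : Nat),
    (l.map String.ofList).foldl
        (fun (p : Int × Int) s => (max p.1 (PySem.Str.len s), p.2 + PySem.Str.len s)) ((a : Int), (t : Int))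
      = ((((l.map List.length).foldl max a : Nat) : Int), ((t + pvSum l : Nat) : Int)) := by
  induction l with
  | nil => intro a t; simp [pvSum]
  | cons h rest ih =>
    intro a t
    rw [List.map_cons, List.foldl_cons]
    have hl : PySem.Str.len (String.ofList h) = (h.length : Int) := by
      simp [PySem.Str.len_eq]
    rw [hl, show (max (a : Int) (h.length : Int)) = ((max a h.length : Nat) : Int) by push_cast; omega,
        show ((t : Int) + (h.length : Int)) = ((t + h.length : Nat) : Int) by push_cast; ring, ih]
    simp only [List.map_cons, List.foldl_cons, pvSum, List.sum_cons, Prod.mk.injEq]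
    refine ⟨trivial, by push_cast; ring⟩

-- per-pair equality: A's 'longest' over the pieces = B's one-pass count/run score
theorem pv_score_eq (pieces : List String) :
    pvLongest pieces =
      (let st := ((pieces.map String.toList).flatten).foldl
          (fun (st : Int × Int × Int) ch =>
            if ch = '0' then (st.1, 0, st.2.2)
            else (st.1 + 1, st.2.1 + 1, if st.2.1 + 1 > st.2.2 then st.2.1 + 1 else st.2.2))
          ((0, 0, 0) : Int × Int × Int)
       st.1 + st.2.2 * st.2.2) := by
  have htemp : (PySem.Str.join "" pieces).toList = (pieces.map String.toList).flatten := by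
    rw [PySem.Str.toList_join]
    simpa using pv_join_nil (pieces.map String.toList)
  set cs := (pieces.map String.toList).flatten with hcs
  have hsplit : (PySem.Str.split? (PySem.Str.join "" pieces) "0").getD []
      = (pvSp cs).map String.ofList := by
    have h0 : ("0" : String).toList = ['0'] := rfl
    simp only [PySem.Str.split?, PySem.Chars.split?, htemp, h0]
    simp [pv_splitOn_eq]
  have hB := pv_fold_stepI cs (0, 0, 0)
  have hN := pv_fold_stepN cs
  have hA := pv_fold_pieces (pvSp cs) 0 0
  simp only [Nat.cast_zero, Nat.zero_add] at hA hB
  simp only [pvLongest, hsplit, hA, hB, hN]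
  rw [show (List.foldl max 0 (List.map List.length (pvSp cs))) = pvMaxLen (pvSp cs) from rfl]
  ring

-- generic loop-shape lemmas for the outer double loop
theorem pv_foldl_snoc {α β : Type} (L : List α) (f : α → β) : ∀ (r0 : List β),
    L.foldl (fun r k => r ++ [f k]) r0 = r0 ++ L.map f := by
  induction L with
  | nil => intro r0; simp
  | cons h t ih => intro r0; simp [ih]

theorem pv_foldl_flatten {α : Type} (L : List α) (g : α → List Char) :
    ∀ (st : Int × Int × Int),
    L.foldl (fun st k => (g k).foldl
        (fun (st : Int × Int × Int) ch =>
          if ch = '0' then (st.1, 0, st.2.2)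
          else (st.1 + 1, st.2.1 + 1, if st.2.1 + 1 > st.2.2 then st.2.1 + 1 else st.2.2)) st) st
      = ((L.map g).flatten).foldl
        (fun (st : Int × Int × Int) ch =>
          if ch = '0' then (st.1, 0, st.2.2)
          else (st.1 + 1, st.2.1 + 1, if st.2.1 + 1 > st.2.2 then st.2.1 + 1 else st.2.2)) st := by
  induction L with
  | nil => intro st; simp
  | cons h t ih =>
    intro st
    rw [List.foldl_cons, List.map_cons, List.flatten_cons, List.foldl_append]
    exact ih _

theorem pv_resA {α β : Type} (L : List α) (J : α → List β) (s : α → β → Int) :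
    ∀ (r0 : List Int),
    L.foldl (fun r i => (J i).foldl (fun r j => r ++ [s i j]) r) r0
      = r0 ++ L.flatMap (fun i => (J i).map (s i)) := by
  induction L with
  | nil => intro r0; simp
  | cons h t ih => intro r0; rw [List.foldl_cons, pv_foldl_snoc, ih]; simp

theorem pv_resB {α β : Type} (L : List α) (J : α → List β) (s : α → β → Int) :
    ∀ (b0 : Option Int),
    L.foldl (fun b i => (J i).foldl (fun b j =>
        match b with
        | none => some (s i j)
        | some m => if s i j > m then some (s i j) else some m) b) b0
      = (L.flatMap (fun i => (J i).map (s i))).foldl (fun b x =>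
        match b with
        | none => some x
        | some m => if x > m then some x else some m) b0 := by
  induction L with
  | nil => intro b0; simp
  | cons h t ih =>
    intro b0
    rw [List.foldl_cons, List.flatMap_cons, List.foldl_append, List.foldl_map]
    exact ih _

theorem pv_max?_eq_foldl (xs : List Int) :
    PySem.List.max? xs (fun x => x) = xs.foldl (fun b x =>
        match b with
        | none => some x
        | some m => if x > m then some x else some m) none := by
  rw [PySem.List.max?]
  congr 1
  funext bo x
  cases bo with
  | none => rfl
  | some m => simp [gt_iff_lt]

theorem pv_foldl_snoc_if {α β : Type} (L : List α) (P : α → Prop) [DecidablePred P] (f : α → β) (y : β) :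
    ∀ (r0 : List β),
    L.foldl (fun r k => if P k then r ++ [f k] else r ++ [y]) r0
      = r0 ++ L.map (fun k => if P k then f k else y) := by
  induction L with
  | nil => intro r0; simp
  | cons h t ih =>
    intro r0
    rw [List.foldl_cons, List.map_cons, ih]
    split_ifs <;> simp

theorem pv_flatMap_congr {α β γ : Type} (L : List α) (J : α → List β) (f g : α → β → γ)
    (h : ∀ i j, f i j = g i j) :
    L.flatMap (fun i => (J i).map (f i)) = L.flatMap (fun i => (J i).map (g i)) := by
  have : f = g := funext fun i => funext fun j => h i j
  rw [this]

-- ===== VERDICT (by name: the statement is the Claim_ definition above) =====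
set_option maxHeartbeats 2000000 in
theorem solution_spec : Claim_equal_solution := by
  intro answer_sheet sheets _ _
  unfold Spec_solution
  simp only [solution, solution_alt]
  rw [pv_resA, pv_resB, pv_max?_eq_foldl]
  simp only [List.nil_append]
  refine congrArg (fun S : List Int => (S.foldl (fun b x =>
      match b with
      | none => some x
      | some m => if x > m then some x else some m) none).getD 0)
    (pv_flatMap_congr _ _ _ _ ?_)
  intro i j
  rw [pv_foldl_snoc_if, pv_foldl_flatten]
  simp only [List.nil_append]
  rw [pv_score_eq]
  simp [List.map_map, Function.comp_def]
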